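-- pv_equiv track=rewrite | github.com/BuiVannn/Python---PTIT | py01056.py | check
-- ===== SOURCE A (Python) =====
-- import math
--
-- def nt(n):
--     for i in range(2, int(math.sqrt(n)) + 1):
--         if n % i == 0:
--             return 0
--     return n > 1
--
-- def check(n):
--     sum = 0
--     for i in range(len(n)):
--         if i % 2 == 0:
--             if int(n[i]) % 2 != 0:
--                 return 0
--         else:
--             if(int(n[i]) % 2 == 0):
--                 return 0
--         sum += int(n[i])
--     if not nt(sum) :
--         return 0
--     return 1
-- ===== SOURCE B (Python) =====
-- def check(n):
--     """Return 1 if the digits of n alternate even/odd starting with an even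
--     digit and their sum is prime, else 0.
--
--     >>> check("61")
--     1
--     >>> check("2143")
--     0
--     >>> check("29")
--     1
--     >>> check("076543")
--     0
--     """
--     # parity law, checked pairwise on the two slices: even positions hold
--     # even digits, odd positions hold odd digits
--     evens, odds = n[::2], n[1::2]
--     for k in range(len(evens)):
--         if int(evens[k]) % 2:
--             return 0
--         if k < len(odds) and int(odds[k]) % 2 == 0:
--             return 0
--     s = sum(map(int, n))
--     # Wilson's theorem: s is prime iff s > 1 and (s-1)! = s-1 (mod s)
--     f = 1
--     for k in range(2, s):
--         f = f * k % s
--     return 1 if s > 1 and f == s - 1 else 0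
-- ===== Notes on version B (the rewrite author's own statement) =====
-- stated objective: alternative
-- what changed: B checks the parity law by walking the two extended slices n[::2] and n[1::2] pairwise instead of A's single index-parity loop, computes the digit sum in a separate pass, and decides primality of the sum by Wilson's theorem ((s-1)! mod s == s-1, one modular-product loop) instead of A's sqrt-bounded trial division; Pre_ excludes exactly the strings on which both raise ValueError (a non-digit not preceded by a parity violation).
import Mathlib
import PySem

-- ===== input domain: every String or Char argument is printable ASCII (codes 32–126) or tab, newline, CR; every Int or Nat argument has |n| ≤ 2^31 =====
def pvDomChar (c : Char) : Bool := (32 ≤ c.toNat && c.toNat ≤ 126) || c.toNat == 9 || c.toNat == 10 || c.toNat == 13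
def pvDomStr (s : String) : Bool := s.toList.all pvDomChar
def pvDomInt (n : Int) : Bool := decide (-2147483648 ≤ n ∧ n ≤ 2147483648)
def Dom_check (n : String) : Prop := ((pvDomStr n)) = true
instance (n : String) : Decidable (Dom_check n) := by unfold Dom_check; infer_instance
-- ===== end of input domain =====

-- B validates the parity pattern by scanning the two extended slices n[::2]/n[1::2]
-- pairwise instead of A's single indexed loop, and tests primality of the digit sum by
-- Wilson's theorem instead of trial division; equivalence proved wherever A returns.

-- ===== PORT A =====

-- int(n[i]) for a single char; exact on digit chars (Pre_ admits only inputs where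
-- every char read by A is a digit; elsewhere Python raises ValueError)
def pvDigit (c : Char) : Int := (PySem.Int.ofChars? [c]).getD 0

-- loop of nt: 'for i in range(2, int(math.sqrt(n)) + 1)'; int(math.sqrt(n)) ported as
-- Nat.sqrt, exact for the nonnegative digit sums nt is called on here
def ntLoop (n : Int) : List Int → Bool
  | [] => decide (n > 1)                    -- 'return n > 1'
  | i :: is => if PySem.Int.mod n i == 0 then false else ntLoop n is

def nt (n : Int) : Bool :=
  ntLoop n (PySem.List.pyRange 2 ((n.toNat.sqrt : Int) + 1) 1)

-- the fused loop of A's check: index i, running sum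
def checkLoop : List Char → Nat → Int → Int
  | [], _, sum => if nt sum then 1 else 0   -- 'if not nt(sum): return 0; return 1'
  | c :: cs, i, sum =>
      if i % 2 == 0 then
        if PySem.Int.mod (pvDigit c) 2 != 0 then 0
        else checkLoop cs (i + 1) (sum + pvDigit c)
      else
        if PySem.Int.mod (pvDigit c) 2 == 0 then 0
        else checkLoop cs (i + 1) (sum + pvDigit c)

def check (n : String) : Int := checkLoop n.toList 0 0

-- ===== PORT B =====

-- hand port of the extended slice s[::2] (no PySem primitive takes a step): every other char
def sliceStep2 : List Char → List Char
  | [] => []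
  | [c] => [c]
  | c :: _ :: rest => c :: sliceStep2 rest

-- Source B's pairwise loop over the two slices: one even-slice and one odd-slice char per
-- step ('k < len(odds)' is the second list being nonempty: both shrink in lockstep)
def pairLoop : List Char → List Char → Bool
  | [], _ => true
  | e :: es, [] =>
      if PySem.Int.mod (pvDigit e) 2 != 0 then false else pairLoop es []
  | e :: es, o :: os =>
      if PySem.Int.mod (pvDigit e) 2 != 0 then false
      else if PySem.Int.mod (pvDigit o) 2 == 0 then false
      else pairLoop es os

-- the Wilson loop of Source B: f = f * k % s over range(2, s)
def wilsonFold (s : Int) : Int :=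
  (PySem.List.pyRange 2 s 1).foldl (fun f k => PySem.Int.mod (f * k) s) 1

def check_alt (n : String) : Int :=
  if pairLoop (sliceStep2 n.toList) (sliceStep2 (n.toList.drop 1)) then
    let s := (n.toList.map pvDigit).sum
    if s > 1 ∧ wilsonFold s = s - 1 then 1 else 0
  else 0

-- ===== PRECONDITION & SPEC =====
-- Pre_ excludes exactly the strings on which the Pythons raise ValueError: those whose first
-- non-digit character is not preceded by a parity violation (both return 0 at the first
-- position i with (digit + i) odd, so such a char is never read; code 48 of the zero digit is even,
-- so Char.toNat carries the parity)
def Pre_check (n : String) : Prop :=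
  (let cs := n.toList
   let j := cs.findIdx (fun c => !c.isDigit)
   j == cs.length || (List.range j).any (fun i => ((cs.getD i ' ').toNat + i) % 2 == 1)) = true
instance (n : String) : Decidable (Pre_check n) := by unfold Pre_check; infer_instance

def pvWitness_check : String := "23"

def Spec_check (n : String) (out : Int) : Prop := out = check_alt n
instance (n : String) (out : Int) : Decidable (Spec_check n out) := by unfold Spec_check; infer_instance

-- ===== CLAIM (what is proved, stated in full; the proofs are below) =====
def Claim_equal_check : Prop := ∀ (n : String), Dom_check n → Pre_check n → Spec_check n (check n)

-- ===== LEMMAS AND PROOFS =====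

-- A's fused loop, started at index i with running sum, in two-pass form
theorem checkLoop_eq (cs : List Char) (i : Nat) (sum : Int) :
    checkLoop cs i sum =
      if (cs.zipIdx i).all (fun p => PySem.Int.mod (pvDigit p.1 + (p.2 : Int)) 2 == 0) then
        (if nt (sum + (cs.map pvDigit).sum) then 1 else 0)
      else 0 := by
  induction cs generalizing i sum with
  | nil => simp [checkLoop]
  | cons c cs ih =>
      have hm2 : ∀ x : Int, PySem.Int.mod x 2 = x % 2 :=
        fun x => PySem.Int.mod_eq_emod_of_pos (by omega)
      simp only [checkLoop, List.zipIdx_cons, List.all_cons, List.map_cons, List.sum_cons, hm2, ih]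
      by_cases hi : i % 2 = 0 <;> by_cases hp : (pvDigit c + (i : Int)) % 2 = 0
      · have hd : pvDigit c % 2 = 0 := by omega
        have hb : ((pvDigit c + (i : Int)) % 2 == 0) = true := by simp [hp]
        rw [hb, Bool.true_and]
        simp [hi, hd, add_assoc]
        try rfl
      · have hd : pvDigit c % 2 ≠ 0 := by omega
        have hb : ((pvDigit c + (i : Int)) % 2 == 0) = false := by simp [hp]
        rw [hb, Bool.false_and]
        simp [hi, hd]
      · have hd : pvDigit c % 2 ≠ 0 := by omega
        have hb : ((pvDigit c + (i : Int)) % 2 == 0) = true := by simp [hp]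
        rw [hb, Bool.true_and]
        simp [hi, hd, add_assoc]
        try rfl
      · have hd : pvDigit c % 2 = 0 := by omega
        have hb : ((pvDigit c + (i : Int)) % 2 == 0) = false := by simp [hp]
        rw [hb, Bool.false_and]
        simp [hi, hd]

theorem sliceStep2_cons (c : Char) (l : List Char) :
    sliceStep2 (c :: l) = c :: sliceStep2 (l.drop 1) := by
  cases l <;> simp [sliceStep2]

-- B's pairwise slice scan computes exactly A's interleaved parity check
theorem pairLoop_eq (cs : List Char) (m : Nat) :
    pairLoop (sliceStep2 cs) (sliceStep2 (cs.drop 1))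
      = (cs.zipIdx (2 * m)).all (fun p => PySem.Int.mod (pvDigit p.1 + (p.2 : Int)) 2 == 0) := by
  induction cs using sliceStep2.induct generalizing m with
  | case1 => simp [sliceStep2, pairLoop]
  | case2 c =>
      have bP1 : ((pvDigit c + ((2 * m : Nat) : Int)) % 2 == 0) = !(pvDigit c % 2 != 0) := by
        rw [Bool.eq_iff_iff]
        simp only [beq_iff_eq, Bool.not_eq_true', bne_eq_false_iff_eq]
        omega
      simp only [sliceStep2, List.drop_succ_cons, List.drop_nil, pairLoop,
        List.zipIdx_cons, List.zipIdx_nil, List.all_cons, List.all_nil, Bool.and_true,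
        PySem.Int.mod_eq_emod_of_pos (show (0:Int) < 2 by omega), bP1]
      cases hc : (pvDigit c % 2 != 0) <;> simp
  | case3 c1 c2 rest ih =>
      have hstep : 2 * m + 1 + 1 = 2 * (m + 1) := by ring
      have bP1 : ((pvDigit c1 + ((2 * m : Nat) : Int)) % 2 == 0) = !(pvDigit c1 % 2 != 0) := by
        rw [Bool.eq_iff_iff]
        simp only [beq_iff_eq, Bool.not_eq_true', bne_eq_false_iff_eq]
        omega
      have bP2 : ((pvDigit c2 + ((2 * m + 1 : Nat) : Int)) % 2 == 0) = !(pvDigit c2 % 2 == 0) := by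
        rw [Bool.eq_iff_iff]
        simp only [beq_iff_eq, Bool.not_eq_true', beq_eq_false_iff_ne, ne_eq]
        omega
      rw [show sliceStep2 (c1 :: c2 :: rest) = c1 :: sliceStep2 rest from rfl,
          show (c1 :: c2 :: rest).drop 1 = c2 :: rest from rfl, sliceStep2_cons]
      simp only [pairLoop, List.zipIdx_cons, List.all_cons, hstep, ih (m + 1),
        PySem.Int.mod_eq_emod_of_pos (show (0:Int) < 2 by omega), bP1, bP2]
      cases h1 : (pvDigit c1 % 2 != 0) <;> cases h2' : (pvDigit c2 % 2 == 0) <;> simp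

theorem ntLoop_any (n : Int) (l : List Int) :
    ntLoop n l = if l.any (fun i => PySem.Int.mod n i == 0) then false else decide (n > 1) := by
  induction l with
  | nil => simp [ntLoop]
  | cons i is ih => by_cases h : (PySem.Int.mod n i == 0) = true <;> simp [ntLoop, h, ih]

-- trial division up to the integer square root decides primality of s.toNat
theorem nt_eq_prime (s : Int) (hs : 0 ≤ s) : nt s = decide (Nat.Prime s.toNat) := by
  unfold nt
  rw [ntLoop_any]
  by_cases ha : ((PySem.List.pyRange 2 ((s.toNat.sqrt : Int) + 1) 1).any
      (fun i => PySem.Int.mod s i == 0)) = true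
  · rw [if_pos ha]
    obtain ⟨i, hmem, hdvd⟩ := List.any_eq_true.mp ha
    rw [PySem.List.mem_pyRange_one] at hmem
    have hdvd' : i ∣ s := PySem.Int.mod_eq_zero_iff_dvd s i |>.mp (by simpa using hdvd)
    symm
    rw [decide_eq_false_iff_not]
    intro hp
    have h2i : 2 ≤ i := hmem.1
    have hin : i.toNat ∣ s.toNat := by
      have : (i.toNat : Int) ∣ (s.toNat : Int) := by
        rwa [Int.toNat_of_nonneg (by omega), Int.toNat_of_nonneg hs]
      exact_mod_cast this
    exact (Nat.prime_def_le_sqrt.mp hp).2 i.toNat (by omega) (by omega) hin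
  · rw [if_neg ha]
    rw [Bool.eq_iff_iff]
    simp only [decide_eq_true_eq]
    constructor
    · intro h1
      rw [Nat.prime_def_le_sqrt]
      refine ⟨by omega, fun m h2m hmsq hdvd => ?_⟩
      apply ha
      refine List.any_eq_true.mpr ⟨(m : Int), ?_, ?_⟩
      · rw [PySem.List.mem_pyRange_one]; omega
      · simp only [beq_iff_eq]
        rw [PySem.Int.mod_eq_zero_iff_dvd]
        have : (m : Int) ∣ (s.toNat : Int) := Int.natCast_dvd_natCast.mpr hdvd
        rwa [Int.toNat_of_nonneg hs] at this
    · intro hp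
      have := Nat.Prime.two_le hp
      omega

-- the Wilson loop reduces mod s at every step, so it computes (r * prod) mod s
theorem foldl_mulmod (s : Int) (hs : 0 < s) (l : List Int) (r : Int) :
    l.foldl (fun f k => PySem.Int.mod (f * k) s) (PySem.Int.mod r s)
      = PySem.Int.mod (r * l.prod) s := by
  induction l generalizing r with
  | nil => simp
  | cons k ks ih =>
      have hm : ∀ x : Int, PySem.Int.mod x s = x % s := fun x => PySem.Int.mod_eq_emod_of_pos hs
      simp only [List.foldl_cons, List.prod_cons]
      rw [show PySem.Int.mod (PySem.Int.mod r s * k) s = PySem.Int.mod (r * k) s by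
            simp [hm, Int.mul_emod, Int.emod_emod_of_dvd],
          ih (r * k)]
      ring_nf

theorem foldl_mulmod' (s : Int) (hs : 0 < s) (l : List Int) (r : Int)
    (hr : PySem.Int.mod r s = r) :
    l.foldl (fun f k => PySem.Int.mod (f * k) s) r = PySem.Int.mod (r * l.prod) s := by
  conv_lhs => rw [← hr]
  rw [foldl_mulmod s hs l r]

theorem prod_pyRange_factorial (S : Nat) (h1 : 1 ≤ S) :
    (PySem.List.pyRange 2 (S : Int) 1).prod = ((Nat.factorial (S - 1)) : Int) := by
  induction S with
  | zero => omega
  | succ S ih =>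
      rcases Nat.lt_or_ge S 2 with hS | hS
      · interval_cases S <;> decide
      · have hr : PySem.List.pyRange 2 ((S + 1 : Nat) : Int) 1
            = PySem.List.pyRange 2 (S : Int) 1 ++ [(S : Int)] := by
          push_cast
          exact PySem.List.pyRange_one_succ_right (by exact_mod_cast hS)
        rw [hr, List.prod_append, ih (by omega)]
        simp only [List.prod_cons, List.prod_nil, mul_one]
        have : Nat.factorial (S + 1 - 1) = Nat.factorial (S - 1) * S := by
          have : S - 1 + 1 = S := by omega
          calc Nat.factorial (S + 1 - 1) = Nat.factorial S := by norm_num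
          _ = Nat.factorial (S - 1 + 1) := by rw [this]
          _ = (S - 1 + 1) * Nat.factorial (S - 1) := Nat.factorial_succ _
          _ = Nat.factorial (S - 1) * S := by rw [this]; ring
        rw [this]
        push_cast
        ring

-- Wilson's theorem: Source B's test '(s-1)! mod s == s-1' decides primality of the digit sum
theorem wilson_eq_prime (s : Int) (hs : 0 ≤ s) :
    (decide (s > 1 ∧ wilsonFold s = s - 1)) = decide (Nat.Prime s.toNat) := by
  by_cases h2 : 2 ≤ s
  · set S := s.toNat with hS
    have hsS : s = (S : Int) := by omega
    have hS2 : 2 ≤ S := by omega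
    have hf : wilsonFold s = (((Nat.factorial (S - 1)) % S : Nat) : Int) := by
      unfold wilsonFold
      rw [foldl_mulmod' s (by omega) _ 1
            (by rw [PySem.Int.mod_eq_emod_of_pos (by omega)]
                exact Int.emod_eq_of_lt (by omega) (by omega)),
          one_mul, hsS, prod_pyRange_factorial S (by omega),
          PySem.Int.mod_eq_emod_of_pos (by exact_mod_cast by omega : (0:Int) < (S:Int))]
      push_cast
      rfl
    rw [Bool.eq_iff_iff]
    simp only [decide_eq_true_eq]
    rw [hf]
    constructor
    · rintro ⟨-, heq⟩
      rw [(Nat.prime_iff_fac_equiv_neg_one (n := S) (by omega))]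
      have hnat : Nat.factorial (S - 1) % S = S - 1 := by omega
      have : ((Nat.factorial (S-1) : Nat) : ZMod S) = ((S - 1 : Nat) : ZMod S) := by
        rw [ZMod.natCast_eq_natCast_iff]
        unfold Nat.ModEq
        rw [hnat, Nat.mod_eq_of_lt (by omega)]
      rw [this]
      push_cast [Nat.cast_sub (by omega : 1 ≤ S)]
      simp
    · intro hp
      refine ⟨by omega, ?_⟩
      have hw := (Nat.prime_iff_fac_equiv_neg_one (n := S) (by omega)).mp hp
      have : ((Nat.factorial (S-1) : Nat) : ZMod S) = ((S - 1 : Nat) : ZMod S) := by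
        rw [hw]
        push_cast [Nat.cast_sub (by omega : 1 ≤ S)]
        simp
      rw [ZMod.natCast_eq_natCast_iff] at this
      have hnat : Nat.factorial (S - 1) % S = S - 1 := by
        rw [this]; exact Nat.mod_eq_of_lt (by omega)
      omega
  · rw [Bool.eq_iff_iff]
    simp only [decide_eq_true_eq]
    constructor
    · intro h; omega
    · intro hp; have := Nat.Prime.two_le hp; omega

-- on a negative argument both tests are trivially false, so the hypothesis 0 ≤ s drops
theorem nt_eq_wilson (s : Int) : nt s = decide (s > 1 ∧ wilsonFold s = s - 1) := by
  rcases le_or_gt 0 s with hs | hs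
  · rw [nt_eq_prime s hs, ← wilson_eq_prime s hs]
  · have h1 : nt s = false := by
      unfold nt
      have h0 : s.toNat = 0 := by omega
      rw [h0]
      rw [show ((Nat.sqrt 0 : Nat) : Int) + 1 = 1 by norm_num]
      rw [PySem.List.pyRange_one_eq_nil (by omega)]
      simp [ntLoop]
      omega
    rw [h1]
    symm
    rw [decide_eq_false_iff_not]
    rintro ⟨h, -⟩
    omega

-- ===== VERDICT (by name: the statement is the Claim_ definition above) =====
theorem check_spec : Claim_equal_check := by
  intro n _ _
  unfold Spec_check check check_alt
  rw [checkLoop_eq]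
  have hp := pairLoop_eq n.toList 0
  rw [show 2 * 0 = 0 from rfl] at hp
  rw [zero_add, ← hp]
  cases h : pairLoop (sliceStep2 n.toList) (sliceStep2 (n.toList.drop 1)) with
  | false => simp
  | true =>
      simp only [if_true]
      rw [nt_eq_wilson]
      by_cases hc : ((n.toList.map pvDigit).sum > 1
          ∧ wilsonFold ((n.toList.map pvDigit).sum) = (n.toList.map pvDigit).sum - 1) <;>
        simp [hc]
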